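-- pv_equiv track=rewrite | github.com/roniantoniius/Python-Latihan | TMC/mooc-programming-24/part07-17_string_helper/src/string_helper.py | split_in_half
-- ===== SOURCE A (Python) =====
-- def split_in_half(orig_string: str) -> tuple:
--     awal = ""
--     akhir = ""
--     panjang = len(orig_string)
--     tengah = panjang // 2
--     for i in range(panjang):
--         if i < tengah:
--             awal += orig_string[i]
--         else:
--             akhir += orig_string[i]
--     return awal, akhir
-- ===== SOURCE B (Python) =====
-- def split_in_half(orig_string: str) -> tuple:
--     tengah = len(orig_string) // 2
--     return orig_string[:tengah], orig_string[tengah:]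
-- ===== Notes on version B (the rewrite author's own statement) =====
-- stated objective: faster
-- what changed: Replaces the index loop that builds both halves character by character (quadratic string concatenation) with two direct slices at the midpoint.
import Mathlib
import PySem

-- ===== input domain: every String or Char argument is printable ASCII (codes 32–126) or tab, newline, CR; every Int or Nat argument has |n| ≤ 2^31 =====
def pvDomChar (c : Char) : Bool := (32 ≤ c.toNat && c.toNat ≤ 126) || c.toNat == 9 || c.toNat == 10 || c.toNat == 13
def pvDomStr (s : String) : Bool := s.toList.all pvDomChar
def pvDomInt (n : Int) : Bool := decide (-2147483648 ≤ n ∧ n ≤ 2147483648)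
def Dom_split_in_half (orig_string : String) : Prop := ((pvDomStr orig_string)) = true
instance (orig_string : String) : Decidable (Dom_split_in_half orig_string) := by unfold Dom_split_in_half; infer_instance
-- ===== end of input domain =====

-- B replaces A's per-index loop (branching each character into one of two accumulators)
-- with two direct slices at the midpoint; objective: simpler.

-- ===== PORT A =====
def split_in_half (orig_string : String) : String × String :=
  let cs := orig_string.toList
  let panjang : Int := PySem.Str.len orig_string
  let tengah : Int := PySem.Int.floordiv panjang 2
  let p := (PySem.List.pyRange 0 panjang 1).foldl
    (fun (st : List Char × List Char) i =>
      if i < tengah then (st.1 ++ [PySem.List.pyGetD cs i ' '], st.2)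
      else (st.1, st.2 ++ [PySem.List.pyGetD cs i ' '])) ([], [])
  (String.ofList p.1, String.ofList p.2)

-- ===== PORT B =====
def split_in_half_alt (orig_string : String) : String × String :=
  let tengah : Int := PySem.Int.floordiv (PySem.Str.len orig_string) 2
  (PySem.Str.slice orig_string none (some tengah),
   PySem.Str.slice orig_string (some tengah) none)

-- ===== PRECONDITION & SPEC =====
def Spec_split_in_half (orig_string : String) (out : String × String) : Prop := out = split_in_half_alt orig_string
instance (orig_string : String) (out : String × String) : Decidable (Spec_split_in_half orig_string out) := by unfold Spec_split_in_half; infer_instance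

-- ===== CLAIM (what is proved, stated in full; the proofs are below) =====
def Claim_equal_split_in_half : Prop := ∀ (orig_string : String), Dom_split_in_half orig_string → Spec_split_in_half orig_string (split_in_half orig_string)

-- ===== LEMMAS AND PROOFS =====

-- A's loop over the first n indices splits the first n characters at index mid.
lemma split_loop_take_drop (cs : List Char) (mid : Int) (hm : 0 ≤ mid) :
    ∀ n : Nat, n ≤ cs.length →
      (PySem.List.pyRange 0 (n : Int) 1).foldl
        (fun (st : List Char × List Char) i =>
          if i < mid then (st.1 ++ [PySem.List.pyGetD cs i ' '], st.2)
          else (st.1, st.2 ++ [PySem.List.pyGetD cs i ' '])) ([], [])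
      = ((cs.take n).take mid.toNat, (cs.take n).drop mid.toNat) := by
  intro n
  induction n with
  | zero => intro _; simp
  | succ n ih =>
    intro hlen
    have hn : n < cs.length := by omega
    have hrange : PySem.List.pyRange 0 ((n + 1 : Nat) : Int) 1
        = PySem.List.pyRange 0 (n : Int) 1 ++ [(n : Int)] := by
      have := PySem.List.pyRange_one_succ_right (a := 0) (b := (n : Int)) (by omega)
      push_cast
      exact this
    rw [hrange, List.foldl_append, ih (by omega)]
    have hget : PySem.List.pyGetD cs (n : Int) ' ' = cs[n] := by
      rw [PySem.List.pyGetD_natCast]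
      simp [hn]
    have htake : cs.take (n + 1) = cs.take n ++ [cs[n]] := by
      rw [List.take_add_one]
      simp [hn]
    have hlen' : (cs.take n).length = n := by simp [List.length_take]; omega
    by_cases hcase : (n : Int) < mid
    · have hmn : n < mid.toNat := by omega
      simp only [List.foldl_cons, List.foldl_nil, if_pos hcase, hget, htake, Prod.mk.injEq]
      have e1 : List.take mid.toNat (List.take n cs) = List.take n cs :=
        List.take_of_length_le (by rw [hlen']; omega)
      have e2 : List.take mid.toNat (List.take n cs ++ [cs[n]]) = List.take n cs ++ [cs[n]] :=
        List.take_of_length_le (by rw [List.length_append, hlen']; simp; omega)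
      have e3 : List.drop mid.toNat (List.take n cs) = [] :=
        List.drop_eq_nil_of_le (by rw [hlen']; omega)
      have e4 : List.drop mid.toNat (List.take n cs ++ [cs[n]]) = [] :=
        List.drop_eq_nil_of_le (by rw [List.length_append, hlen']; simp; omega)
      rw [e1, e2, e3, e4]
      exact ⟨rfl, rfl⟩
    · have hmn : mid.toNat ≤ n := by omega
      simp only [List.foldl_cons, List.foldl_nil, if_neg hcase, hget, htake, Prod.mk.injEq]
      rw [List.take_append_of_le_length (by omega), List.drop_append_of_le_length (by omega)]
      exact ⟨rfl, rfl⟩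

-- ===== VERDICT (by name: the statement is the Claim_ definition above) =====
theorem split_in_half_spec : Claim_equal_split_in_half := by
  intro s _
  unfold Spec_split_in_half split_in_half split_in_half_alt
  set cs := s.toList with hcs
  have hlen : PySem.Str.len s = (cs.length : Int) := PySem.Str.len_eq s
  have hmid : PySem.Int.floordiv ((cs.length : Int)) 2 = ((cs.length / 2 : Nat) : Int) :=
    PySem.Int.floordiv_natCast _ _
  simp only [hlen, hmid]
  rw [split_loop_take_drop cs _ (by positivity) cs.length le_rfl, List.take_length]
  have h1 : PySem.Str.slice s none (some ((cs.length / 2 : Nat) : Int))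
      = String.ofList (cs.take ((cs.length / 2 : Nat) : Int).toNat) := by
    show String.ofList (PySem.List.slice cs none (some ((cs.length / 2 : Nat) : Int))) = _
    rw [PySem.List.slice_to _ (Int.natCast_nonneg _)]
  have h2 : PySem.Str.slice s (some ((cs.length / 2 : Nat) : Int)) none
      = String.ofList (cs.drop ((cs.length / 2 : Nat) : Int).toNat) := by
    show String.ofList (PySem.List.slice cs (some ((cs.length / 2 : Nat) : Int)) none) = _
    rw [PySem.List.slice_from _ (Int.natCast_nonneg _)]
  rw [h1, h2]
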